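-- pv_equiv track=rewrite | github.com/Guiyom974/Autoresearch-BatchMode | experiments/breakthrough/Computational Number Theory - Adaptive LDAB Calibration - 20260326_231024/run_011/05_experiment_code.py | totient_primorial
-- ===== SOURCE A (Python) =====
-- from math import gcd, isqrt
--
-- def primes_up_to(n):
--     """Return list of primes up to n using sieve."""
--     if n < 2:
--         return []
--     sieve = bytearray(b"\x01") * (n + 1)
--     sieve[0:2] = b"\x00\x00"
--     for p in range(2, isqrt(n) + 1):
--         if sieve[p]:
--             sieve[p*p:n+1:p] = b"\x00" * ((n - p*p)//p + 1)
--     return [i for i, is_prime in enumerate(sieve) if is_prime]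
--
-- def totient_primorial(k):
--     """Return φ(P_k) for primorial P_k."""
--     primes = primes_up_to(50)
--     if k < 1 or k > len(primes):
--         raise ValueError(f"k must be between 1 and {len(primes)}")
--     phi = 1
--     for i in range(k):
--         phi *= (primes[i] - 1)
--     return phi
-- ===== SOURCE B (Python) =====
-- def totient_primorial(k):
--     """Return φ(P_k) for primorial P_k."""
--     primes = []
--     for c in range(2, 51):
--         is_prime = True
--         for p in primes:
--             if p * p > c:
--                 break
--             if c % p == 0:
--                 is_prime = False
--                 break
--         if is_prime:
--             primes.append(c)
--     if k < 1 or k > len(primes):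
--         raise ValueError(f"k must be between 1 and {len(primes)}")
--     phi = 1
--     for p in primes[:k]:
--         phi *= p - 1
--     return phi
-- ===== Notes on version B (the rewrite author's own statement) =====
-- stated objective: alternative
-- what changed: Replaces the bytearray Sieve-of-Eratosthenes helper (slice-assignment clearing of multiples) with an incremental trial-division generator that tests each candidate 2..50 against previously found primes up to its square root, and folds the totient product over primes[:k] instead of indexing by range(k).
import Mathlib
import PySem

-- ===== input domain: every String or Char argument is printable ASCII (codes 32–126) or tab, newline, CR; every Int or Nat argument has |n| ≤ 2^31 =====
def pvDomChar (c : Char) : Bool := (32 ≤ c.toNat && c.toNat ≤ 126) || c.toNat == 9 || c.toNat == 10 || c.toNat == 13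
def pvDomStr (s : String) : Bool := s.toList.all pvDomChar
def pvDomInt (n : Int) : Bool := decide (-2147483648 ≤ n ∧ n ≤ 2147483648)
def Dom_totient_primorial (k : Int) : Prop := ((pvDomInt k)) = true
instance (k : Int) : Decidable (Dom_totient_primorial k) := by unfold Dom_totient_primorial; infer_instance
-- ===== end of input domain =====

-- B replaces A's byte-sieve helper by a trial-division prime generator (divide by found primes up to √c); the product loop runs over primes[:k] directly. Objective: alternative.

-- ===== PORT A =====
-- math.isqrt, ported by hand: the largest r ≤ n with r*r ≤ n (exact for every Nat n)
def pyIsqrt (n : Nat) : Nat := (List.range (n + 1)).foldl (fun acc r => if r * r ≤ n then r else acc) 0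

-- sieve-based primes_up_to, step for step (bytearray → List Bool; slice assignment → fold over the stepped range)
def primes_up_to (n : Int) : List Int :=
  if n < 2 then []
  else
    let sieve : List Bool := List.replicate (n + 1).toNat true
    let sieve := (sieve.set 0 false).set 1 false
    let sieve := (PySem.List.pyRange 2 (Int.ofNat (pyIsqrt n.toNat) + 1) 1).foldl
      (fun s p =>
        if s.getD p.toNat false then
          (PySem.List.pyRange (p * p) (n + 1) p).foldl (fun s' m => s'.set m.toNat false) s
        else s) sieve
    (sieve.zipIdx.filter (fun x => x.1)).map (fun x => Int.ofNat x.2)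

def totient_primorial (k : Int) : Int :=
  let primes := primes_up_to 50
  if k < 1 ∨ k > primes.length then 0  -- ValueError in Python; excluded by Pre_
  else (PySem.List.pyRange 0 k 1).foldl
    (fun phi i => phi * (PySem.List.pyGetD primes i 0 - 1)) 1

-- ===== PORT B =====
-- inner 'for p in primes' loop with its two breaks
def pvTrialLoop : List Int → Int → Bool
  | [], _ => true
  | p :: ps, c => if p * p > c then true else if c % p == 0 then false else pvTrialLoop ps c

def totient_primorial_alt (k : Int) : Int :=
  let primes := (PySem.List.pyRange 2 51 1).foldl
    (fun primes c => if pvTrialLoop primes c then primes ++ [c] else primes) []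
  if k < 1 ∨ k > primes.length then 0  -- ValueError in Python; excluded by Pre_
  else (PySem.List.slice primes none (some k)).foldl (fun phi p => phi * (p - 1)) 1

-- ===== PRECONDITION & SPEC =====
-- Pre_ excludes exactly the k outside 1..15 on which the Python A raises ValueError.
def Pre_totient_primorial (k : Int) : Prop := 0 < k ∧ k < 16
instance (k : Int) : Decidable (Pre_totient_primorial k) := by unfold Pre_totient_primorial; infer_instance
def pvWitness_totient_primorial : Int := 7

def Spec_totient_primorial (k : Int) (out : Int) : Prop := out = totient_primorial_alt k
instance (k : Int) (out : Int) : Decidable (Spec_totient_primorial k out) := by unfold Spec_totient_primorial; infer_instance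

-- ===== CLAIM (what is proved, stated in full; the proofs are below) =====
def Claim_equal_totient_primorial : Prop := ∀ (k : Int), Dom_totient_primorial k → Pre_totient_primorial k → Spec_totient_primorial k (totient_primorial k)

-- ===== LEMMAS AND PROOFS =====

-- ===== VERDICT (by name: the statement is the Claim_ definition above) =====
theorem totient_primorial_spec : Claim_equal_totient_primorial := by
  intro k _ hpre
  obtain ⟨h1, h2⟩ := hpre
  unfold Spec_totient_primorial
  interval_cases k <;> decide
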